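-- pv_equiv track=rewrite | github.com/Vanduu15/TDTUHK2_K25 | DSTT/52100674_midterm_chuafix.py | req5
-- ===== SOURCE A (Python) =====
-- def req5(history, k):
--     result = []
--     try:
--         user_number_transactions = {}
--         for his in history:
--             user_number_transactions[his[0][0]] = len(his[1])
--         while len(result) < k:
--             sale_highest = max((user_number_transactions.values()))
--             users_sale_highest = list(filter(lambda x: x[1] == sale_highest, user_number_transactions.items()))
--             users = (list(map(lambda x: x[0], users_sale_highest)))
--             result.extend(users)
--             for user in users:
--                 del user_number_transactions[user]
--     except:
--         return result
--     return result[:k]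
-- ===== SOURCE B (Python) =====
-- def req5(history, k):
--     # Count transactions per user (later records overwrite earlier ones, as in A).
--     counts = {}
--     for users, txs in history:
--         counts[users[0]] = len(txs)
--     # Invert into a count -> [users] bucket table (buckets keep first-occurrence order).
--     buckets = {}
--     for u, c in counts.items():
--         buckets.setdefault(c, []).append(u)
--     # Walk the distinct counts downwards, emitting whole tie-groups until k is reached.
--     result = []
--     for c in sorted(buckets, reverse=True):
--         if len(result) >= k:
--             break
--         result += buckets[c]
--     return result[:k]
-- ===== Notes on version B (the rewrite author's own statement) =====
-- stated objective: alternative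
-- what changed: Replaces A's repeated max-scan-and-delete while loop over the count dict by building a count->users bucket index once and walking its distinct counts in one descending sorted pass.
-- outside the precondition, e.g. on req5([([], [1])], 1): A returns [], B raises IndexError
import Mathlib
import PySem

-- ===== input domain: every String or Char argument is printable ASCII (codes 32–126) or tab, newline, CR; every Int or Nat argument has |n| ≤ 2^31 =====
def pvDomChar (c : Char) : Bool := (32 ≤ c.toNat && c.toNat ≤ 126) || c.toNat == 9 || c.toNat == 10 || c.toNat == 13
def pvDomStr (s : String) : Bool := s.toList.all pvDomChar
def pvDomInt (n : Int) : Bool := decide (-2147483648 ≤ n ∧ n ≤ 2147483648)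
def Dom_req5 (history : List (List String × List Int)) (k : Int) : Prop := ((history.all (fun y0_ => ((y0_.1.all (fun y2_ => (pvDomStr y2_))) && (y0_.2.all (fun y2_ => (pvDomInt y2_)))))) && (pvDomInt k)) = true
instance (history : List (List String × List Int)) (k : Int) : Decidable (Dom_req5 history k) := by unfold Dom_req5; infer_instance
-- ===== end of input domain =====

-- B replaces A's repeated max-scan-and-delete loop over the user→count dict by a count→users
-- bucket index walked once in descending count order (same return values on Pre_).

-- ===== PORT A =====
-- try-block first loop: user_number_transactions[his[0][0]] = len(his[1]); none = IndexError (caught, A returns [])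
def req5BuildA : List (List String × List Int) → PySem.Dict String Int → Option (PySem.Dict String Int)
  | [], d => some d
  | his :: rest, d =>
    match PySem.List.pyGet? his.1 0 with
    | none => none
    | some u => req5BuildA rest (d.insert u (PySem.List.len his.2))

-- the while loop; fuel = size+1 suffices (each round deletes every max-count user, at least one);
-- Bool = True iff max() raised ValueError (empty dict), i.e. the except path was taken
def req5LoopA (k : Int) : Nat → PySem.Dict String Int → List String → List String × Bool
  | 0, _, result => (result, false)
  | fuel+1, d, result =>
    if PySem.List.len result < k then
      match PySem.List.max? d.values (fun v => v) with
      | none => (result, true)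
      | some saleHighest =>
        let users := (d.items.filter (fun x => x.2 == saleHighest)).map Prod.fst
        req5LoopA k fuel (users.foldl (fun d u => d.erase u) d) (result ++ users)
    else (result, false)

def req5 (history : List (List String × List Int)) (k : Int) : List String :=
  match req5BuildA history PySem.Dict.empty with
  | none => []                                        -- except: return result (= [])
  | some d =>
    match req5LoopA k (d.size + 1) d [] with
    | (result, true) => result                        -- except: return result
    | (result, false) => PySem.List.slice result none (some k)   -- return result[:k]

-- ===== PORT B =====
-- for c in sorted(buckets, reverse=True): if len(result) >= k: break; result += buckets[c]
def req5AltGo (k : Int) (buckets : PySem.Dict Int (List String)) : List Int → List String → List String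
  | [], result => result
  | c :: rest, result =>
    if k ≤ PySem.List.len result then result
    else req5AltGo k buckets rest (result ++ buckets.getD c [])

def req5_alt (history : List (List String × List Int)) (k : Int) : List String :=
  -- counts[users[0]] = len(txs); pyGetD is exact here because Pre_ keeps every user list nonempty
  let counts := history.foldl
    (fun d his => d.insert (PySem.List.pyGetD his.1 0 "") (PySem.List.len his.2)) PySem.Dict.empty
  -- buckets.setdefault(c, []).append(u)
  let buckets := counts.items.foldl
    (fun b p => b.modify p.2 [] (fun ls => ls ++ [p.1])) PySem.Dict.empty
  PySem.List.slice
    (req5AltGo k buckets (PySem.List.sorted buckets.keys (fun c => c) true) []) none (some k)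

-- ===== PRECONDITION & SPEC =====
-- Pre_ excludes histories containing a record whose user list is empty: there A's blanket
-- 'except' swallows the IndexError from his[0][0] and returns [], while B raises IndexError.
def Pre_req5 (history : List (List String × List Int)) (k : Int) : Prop :=
  ∀ his ∈ history, his.1 ≠ []
instance (history : List (List String × List Int)) (k : Int) : Decidable (Pre_req5 history k) := by
  unfold Pre_req5; infer_instance
def pvWitness_req5 : (List (List String × List Int)) × Int := ([(["a"], [0, 1]), (["b"], [2])], 1)

def Spec_req5 (history : List (List String × List Int)) (k : Int) (out : List String) : Prop := out = req5_alt history k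
instance (history : List (List String × List Int)) (k : Int) (out : List String) : Decidable (Spec_req5 history k out) := by unfold Spec_req5; infer_instance

-- ===== CLAIM (what is proved, stated in full; the proofs are below) =====
def Claim_equal_req5 : Prop := ∀ (history : List (List String × List Int)) (k : Int), Dom_req5 history k → Pre_req5 history k → Spec_req5 history k (req5 history k)

-- ===== LEMMAS AND PROOFS =====

-- the bucket table of a count dict
def bucketsOf (d : PySem.Dict String Int) : PySem.Dict Int (List String) :=
  d.items.foldl (fun b p => b.modify p.2 [] (fun ls => ls ++ [p.1])) PySem.Dict.empty

theorem req5_build_eq (hist : List (List String × List Int)) (d : PySem.Dict String Int)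
    (h : ∀ his ∈ hist, his.1 ≠ []) :
    req5BuildA hist d = some (hist.foldl
      (fun d his => d.insert (PySem.List.pyGetD his.1 0 "") (PySem.List.len his.2)) d) := by
  induction hist generalizing d with
  | nil => rfl
  | cons his rest ih =>
    have hne : his.1 ≠ [] := h his (by simp)
    obtain ⟨x, xs, hx⟩ := List.exists_cons_of_ne_nil hne
    simp only [req5BuildA, List.foldl_cons, hx, PySem.List.pyGet?_zero_cons,
      PySem.List.pyGetD_zero_cons]
    exact ih _ (fun a ha => h a (by simp [ha]))

theorem bucketsOf_getD (d : PySem.Dict String Int) (c : Int) :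
    (bucketsOf d).getD c [] = (d.items.filter (fun p => p.2 == c)).map Prod.fst := by
  have h : bucketsOf d = (d.items.map Prod.swap).foldl
      (fun b p => b.modify p.1 [] (fun ls => ls ++ [p.2])) PySem.Dict.empty := by
    rw [List.foldl_map]; rfl
  rw [h, PySem.Dict.getD_foldl_modify_append]
  simp [List.filter_map, List.map_map, Function.comp_def, Prod.swap]

theorem bucketsOf_keys (d : PySem.Dict String Int) :
    (bucketsOf d).keys = PySem.Set.ofList d.values := by
  have h := PySem.Dict.keys_foldl_modify_key d.items (fun p => p.2) []
    (fun _ p => (fun ls => ls ++ [p.1])) PySem.Dict.empty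
  simp only [bucketsOf]
  rw [h]
  simp [PySem.Dict.keys_empty, PySem.Set.update_nil_left, PySem.Dict.values]

theorem erase_fold_items_gen (us : List String) (d : PySem.Dict String Int) :
    (us.foldl (fun d u => d.erase u) d).items = d.items.filter (fun p => decide (p.1 ∉ us)) := by
  induction us generalizing d with
  | nil => simp
  | cons u us ih =>
    rw [List.foldl_cons, ih]
    show (d.items.filter _).filter _ = _
    rw [List.filter_filter]
    refine List.filter_congr (fun p _ => ?_)
    by_cases h : p.1 = u <;> by_cases h2 : p.1 ∈ us <;> simp [h, h2]

theorem erase_fold_items (d : PySem.Dict String Int) (m : Int) (hnd : d.keys.Nodup) :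
    ((((d.items.filter (fun x => x.2 == m)).map Prod.fst).foldl (fun d u => d.erase u) d).items)
      = d.items.filter (fun p => !(p.2 == m)) := by
  rw [erase_fold_items_gen]
  refine List.filter_congr (fun p hp => ?_)
  by_cases h : p.2 = m
  · have : p.1 ∈ (d.items.filter (fun x => x.2 == m)).map Prod.fst :=
      List.mem_map_of_mem (List.mem_filter.2 ⟨hp, by simp [h]⟩)
    simp [this, h]
  · have : p.1 ∉ (d.items.filter (fun x => x.2 == m)).map Prod.fst := by
      intro hmem
      obtain ⟨q, hq, hq1⟩ := List.mem_map.1 hmem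
      have hqi : q ∈ d.items := List.mem_of_mem_filter hq
      have hqm : q.2 = m := by simpa using (List.mem_filter.1 hq).2
      have e1 : d.get? p.1 = some p.2 := PySem.Dict.get?_of_mem_items d (by simpa using hp) hnd
      have e2 : d.get? q.1 = some q.2 := PySem.Dict.get?_of_mem_items d (by simpa using hqi) hnd
      rw [hq1, e1] at e2
      exact h ((Option.some_injective _ e2) ▸ hqm)
    simp [this, h]

theorem ofList_filter {α : Type} [BEq α] [LawfulBEq α] (l : List α) (p : α → Bool) :
    PySem.Set.ofList (l.filter p) = (PySem.Set.ofList l).filter p := by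
  induction l with
  | nil => rfl
  | cons x t ih =>
    by_cases hp : p x
    · simp only [List.filter_cons, hp, if_pos, PySem.Set.ofList_cons, PySem.Set.discard, ih,
        List.filter_filter]
      exact congrArg _ (List.filter_congr (fun y _ => by rw [Bool.and_comm]))
    · simp only [List.filter_cons, hp, Bool.false_eq_true, if_false, PySem.Set.ofList_cons,
        PySem.Set.discard, ih, List.filter_filter]
      refine List.filter_congr (fun y _ => ?_)
      by_cases hyx : y == x
      · have : y = x := by exact eq_of_beq hyx
        simp [this, hp]
      · simp [hyx]

theorem sorted_rev_max_cons (xs : List Int) (m : Int) (hnd : xs.Nodup) (hm : m ∈ xs)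
    (hmax : ∀ y ∈ xs, y ≤ m) :
    PySem.List.sorted xs (fun c => c) true
      = m :: PySem.List.sorted (xs.filter (fun y => !(y == m))) (fun c => c) true := by
  have h2 : xs.filter (fun y => !(y == m)) = xs.erase m := by
    rw [List.Nodup.erase_eq_filter hnd]
    exact List.filter_congr (fun y _ => by by_cases h : y = m <;> simp [h, bne])
  apply PySem.List.sorted_rev_eq_of_perm_of_pairwise_gt
  · have h1 : (PySem.List.sorted (xs.filter (fun y => !(y == m))) (fun c => c) true).Perm
        (xs.erase m) := h2 ▸ PySem.List.sorted_perm _ _ _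
    exact List.Perm.trans (List.Perm.cons m h1) (List.perm_cons_erase hm).symm
  · constructor
    · intro y hy
      have hmem : y ∈ xs.filter (fun y => !(y == m)) := (PySem.List.mem_sorted _ _ _ _).1 hy
      have h1 := List.of_mem_filter hmem
      have h2 := hmax y (List.mem_of_mem_filter hmem)
      have : y ≠ m := by simpa using h1
      omega
    · have hpw := PySem.List.sorted_pairwise_rev (xs := xs.filter (fun y => !(y == m)))
        (key := fun c => c)
      have hndf : (PySem.List.sorted (xs.filter (fun y => !(y == m))) (fun c => c) true).Nodup :=
        ((PySem.List.sorted_perm _ _ _).nodup_iff).2 (hnd.filter _)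
      exact (hpw.and hndf).imp (fun h => lt_of_le_of_ne h.1 (Ne.symm h.2))

theorem req5AltGo_congr (k : Int) (b b' : PySem.Dict Int (List String)) (cs : List Int)
    (res : List String) (h : ∀ c ∈ cs, b.getD c [] = b'.getD c []) :
    req5AltGo k b cs res = req5AltGo k b' cs res := by
  induction cs generalizing res with
  | nil => rfl
  | cons c rest ih =>
    simp only [req5AltGo]
    split
    · rfl
    · rw [h c (by simp)]
      exact ih _ (fun c hc => h c (by simp [hc]))

theorem req5AltGo_of_ge (k : Int) (b : PySem.Dict Int (List String)) (cs : List Int)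
    (res : List String) (h : k ≤ PySem.List.len res) : req5AltGo k b cs res = res := by
  cases cs with
  | nil => rfl
  | cons c rest => simp only [req5AltGo, if_pos h]

-- lookup of a surviving count is unchanged by the deletion round
theorem bucketsOf_getD_surviving (d d' : PySem.Dict String Int) (m c : Int)
    (hitems : d'.items = d.items.filter (fun p => !(p.2 == m))) (hc : c ≠ m) :
    (bucketsOf d').getD c [] = (bucketsOf d).getD c [] := by
  rw [bucketsOf_getD, bucketsOf_getD, hitems, List.filter_filter]
  refine congrArg _ (List.filter_congr (fun p _ => ?_))
  by_cases h : p.2 = c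
  · simp [h, hc]
  · simp [h]

-- the main loop correspondence
theorem req5_loop_eq (k : Int) (fuel : Nat) (d : PySem.Dict String Int) (res : List String)
    (hnd : d.keys.Nodup) (hfuel : d.size < fuel) :
    (req5LoopA k fuel d res).1
        = req5AltGo k (bucketsOf d) (PySem.List.sorted (bucketsOf d).keys (fun c => c) true) res
      ∧ ((req5LoopA k fuel d res).2 = true → ((req5LoopA k fuel d res).1.length : Int) < k) := by
  induction fuel generalizing d res with
  | zero => omega
  | succ fuel ih =>
    by_cases hlt : PySem.List.len res < k
    · rw [show req5LoopA k (fuel + 1) d res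
          = (if PySem.List.len res < k then
              match PySem.List.max? d.values (fun v => v) with
              | none => (res, true)
              | some saleHighest =>
                let users := (d.items.filter (fun x => x.2 == saleHighest)).map Prod.fst
                req5LoopA k fuel (users.foldl (fun d u => d.erase u) d) (res ++ users)
            else (res, false)) from rfl, if_pos hlt]
      cases hmax : PySem.List.max? d.values (fun v => v) with
      | none =>
        have hval : d.values = [] := (PySem.List.max?_eq_none_iff _ _).1 hmax
        have hit : d.items = [] := by
          have : d.items.map Prod.snd = [] := hval
          simpa using this
        have hb : bucketsOf d = PySem.Dict.empty := by simp [bucketsOf, hit]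
        refine ⟨?_, ?_⟩
        · simp [hb, PySem.List.sorted, PySem.Dict.keys_empty, req5AltGo]
        · intro _
          simpa [PySem.List.len_eq] using hlt
      | some m =>
        simp only
        set users := (d.items.filter (fun x => x.2 == m)).map Prod.fst with husers
        set d' := users.foldl (fun d u => d.erase u) d with hd'
        have hitems : d'.items = d.items.filter (fun p => !(p.2 == m)) :=
          erase_fold_items d m hnd
        have hnd' : d'.keys.Nodup := by
          have : d'.items.Sublist d.items := by rw [hitems]; exact List.filter_sublist
          exact (this.map Prod.fst).nodup hnd
        have hmem : m ∈ d.values := PySem.List.max?_mem hmax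
        have hsz : d'.size < d.size := by
          show d'.items.length < d.items.length
          rw [hitems]
          refine List.length_filter_lt_length_iff_exists.2 ?_
          obtain ⟨p, hp, hp2⟩ := List.mem_map.1 hmem
          exact ⟨p, hp, by simp [hp2]⟩
        have hvals' : d'.values = d.values.filter (fun y => !(y == m)) := by
          show d'.items.map Prod.snd = (d.items.map Prod.snd).filter (fun y => !(y == m))
          rw [hitems, List.filter_map]
          rfl
        have hkeys' : (bucketsOf d').keys
            = (PySem.Set.ofList d.values).filter (fun y => !(y == m)) := by
          rw [bucketsOf_keys, hvals', ofList_filter]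
        have hsorted : PySem.List.sorted (bucketsOf d).keys (fun c => c) true
            = m :: PySem.List.sorted (bucketsOf d').keys (fun c => c) true := by
          rw [bucketsOf_keys, hkeys']
          exact sorted_rev_max_cons _ m (PySem.Set.nodup_ofList _)
            ((PySem.Set.mem_ofList _ _).2 hmem)
            (fun y hy => PySem.List.max?_isMax hmax y ((PySem.Set.mem_ofList _ _).1 hy))
        have hbm : (bucketsOf d).getD m [] = users := (bucketsOf_getD d m).trans husers.symm
        have hstep : req5AltGo k (bucketsOf d)
              (PySem.List.sorted (bucketsOf d).keys (fun c => c) true) res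
            = req5AltGo k (bucketsOf d)
              (PySem.List.sorted (bucketsOf d').keys (fun c => c) true) (res ++ users) := by
          rw [hsorted]
          show (if k ≤ PySem.List.len res then res else _) = _
          rw [if_neg (by omega), hbm]
        have hcne : ∀ c ∈ PySem.List.sorted (bucketsOf d').keys (fun c => c) true, c ≠ m := by
          intro c hc
          have hck : c ∈ (bucketsOf d').keys := (PySem.List.mem_sorted _ _ _ _).1 hc
          rw [hkeys'] at hck
          simpa using List.of_mem_filter hck
        have hcongr : req5AltGo k (bucketsOf d)
              (PySem.List.sorted (bucketsOf d').keys (fun c => c) true) (res ++ users)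
            = req5AltGo k (bucketsOf d')
              (PySem.List.sorted (bucketsOf d').keys (fun c => c) true) (res ++ users) :=
          req5AltGo_congr k _ _ _ _
            (fun c hc => (bucketsOf_getD_surviving d d' m c hitems (hcne c hc)).symm)
        obtain ⟨ih1, ih2⟩ := ih d' (res ++ users) hnd' (by omega)
        exact ⟨ih1.trans (hcongr.symm.trans hstep.symm), ih2⟩
    · rw [show req5LoopA k (fuel + 1) d res
          = (if PySem.List.len res < k then
              match PySem.List.max? d.values (fun v => v) with
              | none => (res, true)
              | some saleHighest =>
                let users := (d.items.filter (fun x => x.2 == saleHighest)).map Prod.fst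
                req5LoopA k fuel (users.foldl (fun d u => d.erase u) d) (res ++ users)
            else (res, false)) from rfl, if_neg hlt]
      exact ⟨(req5AltGo_of_ge k _ _ res (by omega)).symm, by simp⟩


-- ===== VERDICT (by name: the statement is the Claim_ definition above) =====
theorem req5_spec : Claim_equal_req5 := by
  unfold Claim_equal_req5
  intro history k _ hpre
  unfold Spec_req5 req5 req5_alt
  rw [req5_build_eq history PySem.Dict.empty hpre]
  set counts := history.foldl
    (fun d his => d.insert (PySem.List.pyGetD his.1 0 "") (PySem.List.len his.2))
    PySem.Dict.empty with hcounts
  have hnd : counts.keys.Nodup :=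
    PySem.Dict.nodup_keys_foldl_insert_key history (fun his => PySem.List.pyGetD his.1 0 "")
      (fun d his => PySem.List.len his.2) PySem.Dict.empty PySem.Dict.nodup_keys_empty
  have hb : counts.items.foldl
      (fun b p => b.modify p.2 [] (fun ls => ls ++ [p.1])) PySem.Dict.empty = bucketsOf counts :=
    rfl
  obtain ⟨h1, h2⟩ := req5_loop_eq k (counts.size + 1) counts [] hnd (by omega)
  show (match req5LoopA k (counts.size + 1) counts [] with
        | (result, true) => result
        | (result, false) => PySem.List.slice result none (some k))
      = PySem.List.slice (req5AltGo k (bucketsOf counts)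
          (PySem.List.sorted (bucketsOf counts).keys (fun c => c) true) []) none (some k)
  cases hr : req5LoopA k (counts.size + 1) counts [] with
  | mk r flag =>
    rw [hr] at h1 h2
    simp only at h1 h2
    cases flag with
    | true =>
      show r = PySem.List.slice _ none (some k)
      rw [← h1]
      have hlen : (r.length : Int) < k := h2 rfl
      rw [PySem.List.slice_to r (by omega : (0:Int) ≤ k)]
      exact (List.take_of_length_le (by omega)).symm
    | false =>
      show PySem.List.slice r none (some k) = PySem.List.slice _ none (some k)
      rw [← h1]
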